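-- pv_equiv track=rewrite | github.com/sofia285/FP | study.py | num_para_seq_cod
-- ===== SOURCE A (Python) =====
-- def num_para_seq_cod(n):
--     tup=()
--     if not isinstance(n,int) or n<0:
--         raise ValueError('explode: argumento invalido')
--     while n>0:
--         dig=n%10
--         tup = (dig,) + tup
--         n=n//10
--     tup2=()
--     for i in tup:
--         if i!=8 and i%2==0:
--             i+=2
--             tup2+=(i,)
--         elif i==8:
--             i=0
--             tup2+=(i,)
--         elif i!=1 and i%2!=0:
--             i=i-2
--             tup2+=(i,)
--         else:
--             i=9
--             tup2+=(i,)
--     return tup2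
-- ===== SOURCE B (Python) =====
-- def num_para_seq_cod(n):
--     if not isinstance(n, int) or n < 0:
--         raise ValueError('explode: argumento invalido')
--     res = ()
--     while n > 0:
--         d = n % 10
--         res = ((d + 2) % 10 if d % 2 == 0 else (d - 2) % 10,) + res
--         n //= 10
--     return res
-- ===== Notes on version B (the rewrite author's own statement) =====
-- stated objective: simpler
-- what changed: B fuses A's two passes (digit collection, then a 4-branch per-digit rewrite) into one while-loop that transforms each digit inline with the closed form (d+2)%10 for even / (d-2)%10 for odd digits.
import Mathlib
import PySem

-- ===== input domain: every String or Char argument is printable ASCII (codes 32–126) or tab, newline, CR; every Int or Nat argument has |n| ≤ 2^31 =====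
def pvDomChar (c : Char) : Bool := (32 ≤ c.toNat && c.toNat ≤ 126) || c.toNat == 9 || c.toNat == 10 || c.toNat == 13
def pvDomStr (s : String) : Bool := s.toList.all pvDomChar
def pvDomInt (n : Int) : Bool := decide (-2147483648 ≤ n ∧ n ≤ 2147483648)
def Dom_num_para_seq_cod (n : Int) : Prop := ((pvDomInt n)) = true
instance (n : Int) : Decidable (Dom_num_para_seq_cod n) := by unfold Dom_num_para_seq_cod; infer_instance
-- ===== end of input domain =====

-- B fuses A's two passes (digit collection, then a 4-branch rewrite) into one loop
-- with the closed-form digit map (d+2)%10 / (d-2)%10; objective: simpler.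


-- ===== PORT A =====
-- while n>0: dig=n%10; tup=(dig,)+tup; n=n//10
def pvCollectDigits (n : Int) (tup : List Int) : List Int :=
  if h : n > 0 then
    pvCollectDigits (PySem.Int.floordiv n 10) (PySem.Int.mod n 10 :: tup)
  else tup
  termination_by n.toNat
  decreasing_by
    have := PySem.Int.floordiv_eq_ediv_of_pos (a := n) (b := 10) (by omega)
    omega

def num_para_seq_cod (n : Int) : List Int :=
  let tup := pvCollectDigits n []
  tup.foldl (fun tup2 i =>
    if i ≠ 8 ∧ PySem.Int.mod i 2 = 0 then tup2 ++ [i + 2]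
    else if i = 8 then tup2 ++ [0]
    else if i ≠ 1 ∧ PySem.Int.mod i 2 ≠ 0 then tup2 ++ [i - 2]
    else tup2 ++ [9]) []

-- ===== PORT B =====
-- single while-loop: transform each digit inline and prepend it
def pvAltLoop (n : Int) (res : List Int) : List Int :=
  if h : n > 0 then
    let d := PySem.Int.mod n 10
    pvAltLoop (PySem.Int.floordiv n 10)
      ((if PySem.Int.mod d 2 = 0 then PySem.Int.mod (d + 2) 10 else PySem.Int.mod (d - 2) 10) :: res)
  else res
  termination_by n.toNat
  decreasing_by
    have := PySem.Int.floordiv_eq_ediv_of_pos (a := n) (b := 10) (by omega)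
    omega

def num_para_seq_cod_alt (n : Int) : List Int := pvAltLoop n []

-- ===== PRECONDITION & SPEC =====
-- A raises ValueError on n < 0; B does the same, so those inputs are excluded.
def Pre_num_para_seq_cod (n : Int) : Prop := 0 ≤ n
instance (n : Int) : Decidable (Pre_num_para_seq_cod n) := by unfold Pre_num_para_seq_cod; infer_instance
def pvWitness_num_para_seq_cod : Int := (1829)

def Spec_num_para_seq_cod (n : Int) (out : List Int) : Prop := out = num_para_seq_cod_alt n
instance (n : Int) (out : List Int) : Decidable (Spec_num_para_seq_cod n out) := by unfold Spec_num_para_seq_cod; infer_instance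

-- ===== CLAIM (what is proved, stated in full; the proofs are below) =====
def Claim_equal_num_para_seq_cod : Prop := ∀ (n : Int), Dom_num_para_seq_cod n → Pre_num_para_seq_cod n → Spec_num_para_seq_cod n (num_para_seq_cod n)

-- ===== LEMMAS AND PROOFS =====

-- A's per-digit rewrite, as a function
def pvFA (i : Int) : Int :=
  if i ≠ 8 ∧ PySem.Int.mod i 2 = 0 then i + 2
  else if i = 8 then 0
  else if i ≠ 1 ∧ PySem.Int.mod i 2 ≠ 0 then i - 2
  else 9

theorem pvFoldlA_eq_map (l acc : List Int) :
    l.foldl (fun tup2 i =>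
      if i ≠ 8 ∧ PySem.Int.mod i 2 = 0 then tup2 ++ [i + 2]
      else if i = 8 then tup2 ++ [0]
      else if i ≠ 1 ∧ PySem.Int.mod i 2 ≠ 0 then tup2 ++ [i - 2]
      else tup2 ++ [9]) acc = acc ++ l.map pvFA := by
  induction l generalizing acc with
  | nil => simp
  | cons x xs ih =>
      simp only [List.foldl_cons, List.map_cons, ih, pvFA]
      split_ifs <;> simp

-- on a digit 0 ≤ d < 10, A's 4-branch rewrite equals B's closed form
theorem pvFA_eq_closed (d : Int) (h0 : 0 ≤ d) (h10 : d < 10) :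
    pvFA d = (if PySem.Int.mod d 2 = 0 then PySem.Int.mod (d + 2) 10 else PySem.Int.mod (d - 2) 10) := by
  interval_cases d <;> decide

theorem pvAltLoop_eq_map (n : Int) (acc : List Int) :
    pvAltLoop n (acc.map pvFA) = (pvCollectDigits n acc).map pvFA := by
  induction n, acc using pvCollectDigits.induct with
  | case1 n acc h ih =>
      rw [pvCollectDigits, pvAltLoop]
      simp only [dif_pos h]
      have hd0 : 0 ≤ PySem.Int.mod n 10 := by
        rw [PySem.Int.mod_eq_emod_of_pos (a := n) (b := 10) (by omega)]; omega
      have hd10 : PySem.Int.mod n 10 < 10 := by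
        rw [PySem.Int.mod_eq_emod_of_pos (a := n) (b := 10) (by omega)]; omega
      rw [← ih, ← pvFA_eq_closed _ hd0 hd10]
      simp
  | case2 n acc h =>
      rw [pvCollectDigits, pvAltLoop]
      simp [h]

-- ===== VERDICT (by name: the statement is the Claim_ definition above) =====
theorem num_para_seq_cod_spec : Claim_equal_num_para_seq_cod := by
  intro n _ _
  unfold Spec_num_para_seq_cod num_para_seq_cod num_para_seq_cod_alt
  rw [pvFoldlA_eq_map]
  have := pvAltLoop_eq_map n []
  simpa using this.symm
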